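-- pv_equiv track=rewrite | github.com/poschi3/AdventOfCode2023 | day13/day13.py | find_pair_horizontal_with_fixing
-- ===== SOURCE A (Python) =====
-- def is_diff_one_char(a, b):
--     found = False
--     for i, c_a in enumerate(a):
--         if c_a != b[i]:
--             if found:
--                 return False
--             found = True
--     return found
--
-- def column(field, x):
--     return [row[x] for row in field]
--
-- def find_pair_horizontal_with_fixing(field):
--     pairs = []
--     for x in range(0, len(field[0])-1):
--         current_row = column(field, x)
--         next_row = column(field, x+1)
--         if current_row == next_row:
--             pairs.append((x, False))
--         elif is_diff_one_char(current_row, next_row):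
--             pairs.append((x, True))
--     return pairs
-- ===== SOURCE B (Python) =====
-- def find_pair_horizontal_with_fixing(field):
--     # Row-major sweep: accumulate, per adjacent column pair, how many rows
--     # disagree there; then classify counts (0 -> exact mirror, 1 -> fixable).
--     diff = [0] * (len(field[0]) - 1)
--     for row in field:
--         diff = [d + (a != b) for d, a, b in zip(diff, row, row[1:])]
--     return [(x, d == 1) for x, d in enumerate(diff) if d <= 1]
-- ===== Notes on version B (the rewrite author's own statement) =====
-- stated objective: alternative
-- what changed: B never forms columns: it sweeps the field row by row, accumulating in a per-column-pair counter array how many rows disagree at each adjacent column pair, then classifies the counters in a final pass (count 0 -> (x,False), count 1 -> (x,True)); A extracts both columns for each pair and compares them with a list-equality test plus an early-exit one-diff helper.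
import Mathlib
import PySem

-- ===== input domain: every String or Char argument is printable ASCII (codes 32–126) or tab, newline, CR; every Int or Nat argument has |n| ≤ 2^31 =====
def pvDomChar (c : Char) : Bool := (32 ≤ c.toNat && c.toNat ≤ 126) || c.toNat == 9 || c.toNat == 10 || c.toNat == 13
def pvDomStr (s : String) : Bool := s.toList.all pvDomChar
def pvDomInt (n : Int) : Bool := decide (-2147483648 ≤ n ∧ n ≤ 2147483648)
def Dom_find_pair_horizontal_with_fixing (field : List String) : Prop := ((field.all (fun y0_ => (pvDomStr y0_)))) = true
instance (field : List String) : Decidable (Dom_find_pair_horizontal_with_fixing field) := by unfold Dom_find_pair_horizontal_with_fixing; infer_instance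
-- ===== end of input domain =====

-- B replaces A's column-extraction-and-compare with a row-major sweep that accumulates per-pair mismatch counters and classifies them at the end (alternative decomposition, same cost); Pre_ excludes exactly the inputs where A raises IndexError.


-- ===== PORT A =====
-- column(field, x): row[x] via PySem.Str.pyGet?; the default ' ' is never used under Pre_ (out of range = Python IndexError, excluded).
def pvColumn (field : List String) (x : Int) : List Char :=
  field.map (fun row => (PySem.Str.pyGet? row x).getD ' ')

-- is_diff_one_char's loop: i is the running index into b, found the flag; early 'return False' is the literal false branch.
def pvDiffGo (b : List Char) : List Char → Int → Bool → Bool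
  | [], _, found => found
  | c :: t, i, found =>
      if c ≠ (PySem.List.pyGet? b i).getD ' ' then
        if found then false else pvDiffGo b t (i + 1) true
      else pvDiffGo b t (i + 1) found

def pvIsDiffOneChar (a b : List Char) : Bool := pvDiffGo b a 0 false

def find_pair_horizontal_with_fixing (field : List String) : List (Int × Bool) :=
  (PySem.List.pyRange 0 (((field.headD "").toList.length : Int) - 1) 1).foldl
    (fun pairs x =>
      let current_row := pvColumn field x
      let next_row := pvColumn field (x + 1)
      if current_row = next_row then pairs ++ [(x, false)]
      else if pvIsDiffOneChar current_row next_row then pairs ++ [(x, true)]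
      else pairs) []

-- ===== PORT B =====
-- the per-row update: '[d + (a != b) for d, a, b in zip(diff, row, row[1:])]';
-- Python's 3-way zip of truncating length is the nested List.zip, row[1:] is the slice, bool-as-int is the if.
def pvRowStep (diff : List Int) (row : String) : List Int :=
  (diff.zip (row.toList.zip (PySem.List.slice row.toList (some 1) none))).map
    (fun t => t.1 + (if t.2.1 ≠ t.2.2 then 1 else 0))

def find_pair_horizontal_with_fixing_alt (field : List String) : List (Int × Bool) :=
  let diff0 : List Int := List.replicate ((((field.headD "").toList.length : Int) - 1).toNat) 0
  let diff := field.foldl pvRowStep diff0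
  (PySem.List.enumerate diff 0).foldl
    (fun res p => if p.2 ≤ 1 then res ++ [(p.1, decide (p.2 = 1))] else res) []

-- ===== PRECONDITION & SPEC =====
-- Pre_ excludes exactly the inputs on which A raises IndexError: the empty field (field[0]),
-- and fields whose first row has length ≥ 2 while some row is shorter than it (row[x] in column()).
def Pre_find_pair_horizontal_with_fixing (field : List String) : Prop :=
  field ≠ [] ∧ (2 ≤ (field.headD "").toList.length →
    ∀ row ∈ field, (field.headD "").toList.length ≤ row.toList.length)
instance (field : List String) : Decidable (Pre_find_pair_horizontal_with_fixing field) := by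
  unfold Pre_find_pair_horizontal_with_fixing; infer_instance

def pvWitness_find_pair_horizontal_with_fixing : List String := ["#.#", "#.."]

def Spec_find_pair_horizontal_with_fixing (field : List String) (out : List (Int × Bool)) : Prop := out = find_pair_horizontal_with_fixing_alt field
instance (field : List String) (out : List (Int × Bool)) : Decidable (Spec_find_pair_horizontal_with_fixing field out) := by unfold Spec_find_pair_horizontal_with_fixing; infer_instance

-- ===== CLAIM (what is proved, stated in full; the proofs are below) =====
def Claim_equal_find_pair_horizontal_with_fixing : Prop := ∀ (field : List String), Dom_find_pair_horizontal_with_fixing field → Pre_find_pair_horizontal_with_fixing field → Spec_find_pair_horizontal_with_fixing field (find_pair_horizontal_with_fixing field)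

-- ===== LEMMAS AND PROOFS =====

-- character of row at Nat index, with A's never-used default
def pvGetc (row : String) (j : Nat) : Char := row.toList[j]?.getD ' '

-- the column at a Nat index
def pvColf (field : List String) (j : Nat) : List Char := field.map (fun row => pvGetc row j)

lemma pv_column_natCast (field : List String) (j : Nat) :
    pvColumn field (j : Int) = pvColf field j := by
  simp [pvColumn, pvColf, pvGetc]

-- the per-pair mismatch count over a list of rows, as B accumulates it
def pvCnt (rows : List String) (x : Nat) : Int :=
  (rows.map (fun row => if pvGetc row x ≠ pvGetc row (x + 1) then (1 : Int) else 0)).sum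

-- mismatch count between two equal-length lists (A-side characterisation)
def pvCountDiff : List Char → List Char → Nat
  | a :: as, b :: bs => (if a ≠ b then 1 else 0) + pvCountDiff as bs
  | _, _ => 0

-- mismatch count is 0 iff the lists are equal (same length)
lemma pv_cd_zero : ∀ a b : List Char, a.length = b.length → (pvCountDiff a b = 0 ↔ a = b) := by
  intro a
  induction a with
  | nil =>
    intro b h
    cases b with
    | nil => simp [pvCountDiff]
    | cons d u => simp at h
  | cons c t ih =>
    intro b h
    cases b with
    | nil => simp at h
    | cons d u =>
      have h' : t.length = u.length := by simpa using h
      by_cases hcd : c = d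
      · subst hcd; simp [pvCountDiff, ih u h']
      · simp [pvCountDiff, hcd]

-- A's helper loop counted: result is "found + remaining mismatches = 1"
lemma pv_diffGo_eq : ∀ (a b : List Char) (i : Nat) (found : Bool),
    i + a.length ≤ b.length →
    pvDiffGo b a (i : Nat) found
      = decide ((if found then 1 else 0) + pvCountDiff a (b.drop i) = 1) := by
  intro a
  induction a with
  | nil => intro b i found _; cases found <;> simp [pvDiffGo, pvCountDiff]
  | cons c t ih =>
    intro b i found hlen
    have hi : i < b.length := by simp at hlen; omega
    have hdrop : b.drop i = b[i] :: b.drop (i + 1) := by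
      rw [List.getElem_cons_drop]
    have hget : (PySem.List.pyGet? b (i : Int)).getD ' ' = b[i] := by
      simp [PySem.List.pyGet?_natCast, List.getElem?_eq_getElem hi]
    have hcast : ((i : Int) + 1) = ((i + 1 : Nat) : Int) := by push_cast; ring
    by_cases hc : c = b[i]
    · rw [pvDiffGo, hget, if_neg (by simp [hc]), hcast,
        ih b (i + 1) found (by simp at hlen ⊢; omega), hdrop]
      simp [pvCountDiff, hc]
    · rw [pvDiffGo, hget, if_pos (by simp [hc]), hdrop]
      cases found with
      | true =>
        simp [pvCountDiff, hc]
      | false =>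
        rw [hcast, ih b (i + 1) true (by simp at hlen ⊢; omega)]
        simp only [pvCountDiff, if_pos (by simp [hc] : ¬c = b[i]), Bool.false_eq_true,
          ite_true, ite_false]
        rw [decide_eq_decide]
        omega

lemma pv_isDiff_eq (a b : List Char) (h : a.length ≤ b.length) :
    pvIsDiffOneChar a b = decide (pvCountDiff a b = 1) := by
  have := pv_diffGo_eq a b 0 false (by omega)
  simpa [pvIsDiffOneChar] using this

-- the A-side count of two columns IS B's accumulated per-pair counter
lemma pv_cd_cols : ∀ (rows : List String) (x : Nat),
    (pvCountDiff (pvColf rows x) (pvColf rows (x + 1)) : Int) = pvCnt rows x := by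
  intro rows
  induction rows with
  | nil => intro x; simp [pvColf, pvCnt, pvCountDiff]
  | cons r rs ih =>
    intro x
    have hc : ∀ j, pvColf (r :: rs) j = pvGetc r j :: pvColf rs j := fun j => rfl
    have hcnt : pvCnt (r :: rs) x
        = (if pvGetc r x ≠ pvGetc r (x + 1) then (1 : Int) else 0) + pvCnt rs x := by
      simp only [pvCnt, List.map_cons, List.sum_cons]
    rw [hc, hc, pvCountDiff, hcnt]
    push_cast
    rw [ih x]

-- one row step on a counter list presented as a map over range
lemma pv_rowStep_map (n : Nat) (f : Nat → Int) (row : String)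
    (hlen : n + 1 ≤ row.toList.length) :
    pvRowStep ((List.range n).map f) row
      = (List.range n).map (fun x => f x + (if pvGetc row x ≠ pvGetc row (x + 1) then 1 else 0)) := by
  unfold pvRowStep
  rw [PySem.List.slice_from_one]
  apply List.ext_getElem
  · simp only [List.length_map, List.length_zip, List.length_tail, List.length_range]; omega
  · intro i h1 h2
    rw [List.length_map, List.length_zip, List.length_zip, List.length_tail,
      List.length_map, List.length_range] at h1
    have hi1 : i < row.toList.length := by omega
    have hi2 : i + 1 < row.toList.length := by omega
    simp only [List.getElem_map, List.getElem_zip, List.getElem_tail, List.getElem_range]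
    simp [pvGetc, List.getElem?_eq_getElem hi1, List.getElem?_eq_getElem hi2]

-- the rows fold keeps the counter list a map over range, adding pvCnt
lemma pv_fold_rows (n : Nat) : ∀ (rows : List String) (f : Nat → Int),
    (∀ r ∈ rows, n + 1 ≤ r.toList.length) →
    rows.foldl pvRowStep ((List.range n).map f)
      = (List.range n).map (fun x => f x + pvCnt rows x) := by
  intro rows
  induction rows with
  | nil => intro f _; simp [pvCnt]
  | cons r rs ih =>
    intro f hall
    rw [List.foldl_cons, pv_rowStep_map n f r (hall r List.mem_cons_self),
      ih _ (fun r hr => hall r (List.mem_cons_of_mem _ hr))]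
    apply List.map_congr_left
    intro x _
    have hcnt : pvCnt (r :: rs) x
        = (if pvGetc r x ≠ pvGetc r (x + 1) then (1 : Int) else 0) + pvCnt rs x := by
      simp only [pvCnt, List.map_cons, List.sum_cons]
    rw [hcnt]
    ring

-- degenerate widths: the counter list is empty and stays empty
lemma pv_fold_rows_nil : ∀ rows : List String, rows.foldl pvRowStep [] = [] := by
  intro rows
  induction rows with
  | nil => rfl
  | cons r rs ih => simpa [pvRowStep] using ih

lemma pv_enum_range_map {α : Type} :
    ∀ (m : Nat) (g : Nat → α) (s : Int), PySem.List.enumerate ((List.range m).map g) s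
      = (List.range m).map (fun (k : Nat) => ((s + k : Int), g k)) := by
  intro m
  induction m with
  | zero => intro g s; simp
  | succ p ih =>
    intro g s
    rw [List.range_succ_eq_map]
    simp only [List.map_cons, List.map_map, PySem.List.enumerate_cons]
    rw [ih (g ∘ Nat.succ) (s + 1)]
    refine congrArg₂ _ (by simp) ?_
    refine List.map_congr_left ?_
    intro k _
    simp only [Function.comp, Nat.succ_eq_add_one]
    refine congrArg₂ _ ?_ rfl
    push_cast
    ring

-- ===== VERDICT (by name: the statement is the Claim_ definition above) =====
theorem find_pair_horizontal_with_fixing_spec : Claim_equal_find_pair_horizontal_with_fixing := by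
  intro field _ hpre
  obtain ⟨hne, hwide⟩ := hpre
  unfold Spec_find_pair_horizontal_with_fixing
  simp only [find_pair_horizontal_with_fixing, find_pair_horizontal_with_fixing_alt]
  by_cases hsmall : (field.headD "").toList.length ≤ 1
  · rw [PySem.List.pyRange_one_eq_nil (by omega)]
    rw [show ((((field.headD "").toList.length : Int) - 1).toNat) = 0 from by omega]
    rw [show (List.replicate 0 (0 : Int)) = [] from rfl, pv_fold_rows_nil]
    simp [PySem.List.enumerate]
  · push Not at hsmall
    have hall : ∀ row ∈ field, (field.headD "").toList.length ≤ row.toList.length :=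
      hwide (by omega)
    rw [show ((((field.headD "").toList.length : Int) - 1).toNat)
        = (field.headD "").toList.length - 1 from by omega]
    rw [show List.replicate ((field.headD "").toList.length - 1) (0 : Int)
        = (List.range ((field.headD "").toList.length - 1)).map (fun _ => (0 : Int)) from by
      simp [List.map_const']]
    rw [pv_fold_rows ((field.headD "").toList.length - 1) field (fun _ => 0)
      (fun r hr => by have := hall r hr; omega)]
    simp only [zero_add]
    rw [pv_enum_range_map, PySem.List.pyRange_one]
    rw [show (((field.headD "").toList.length : Int) - 1 - 0).toNat
        = (field.headD "").toList.length - 1 from by omega]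
    rw [List.foldl_map, List.foldl_map]
    apply PySem.List.foldl_congr_mem
    intro acc k _
    have h1 : pvColumn field (0 + (k : Int)) = pvColf field k := by
      rw [zero_add, pv_column_natCast]
    have h2 : pvColumn field (0 + (k : Int) + 1) = pvColf field (k + 1) := by
      rw [show (0 + (k : Int) + 1) = ((k + 1 : Nat) : Int) from by push_cast; ring,
        pv_column_natCast]
    rw [h1, h2, ← pv_cd_cols field k]
    simp only []
    have hlen : (pvColf field k).length = (pvColf field (k + 1)).length := by
      simp [pvColf]
    by_cases heq : pvColf field k = pvColf field (k + 1)
    · have hd0 : pvCountDiff (pvColf field k) (pvColf field (k + 1)) = 0 :=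
        (pv_cd_zero _ _ hlen).mpr heq
      rw [if_pos heq, if_pos (by rw [hd0]; simp : (pvCountDiff (pvColf field k) (pvColf field (k + 1)) : Int) ≤ 1)]
      simp [hd0]
    · have hd0 : pvCountDiff (pvColf field k) (pvColf field (k + 1)) ≠ 0 :=
        fun h => heq ((pv_cd_zero _ _ hlen).mp h)
      rw [if_neg heq, pv_isDiff_eq _ _ (le_of_eq hlen)]
      by_cases hd1 : pvCountDiff (pvColf field k) (pvColf field (k + 1)) = 1
      · rw [if_pos (by simp [hd1] : decide (pvCountDiff (pvColf field k) (pvColf field (k + 1)) = 1) = true),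
          if_pos (by rw [hd1]; simp : (pvCountDiff (pvColf field k) (pvColf field (k + 1)) : Int) ≤ 1)]
        simp [hd1]
      · rw [if_neg (by simp [hd1] : ¬decide (pvCountDiff (pvColf field k) (pvColf field (k + 1)) = 1) = true),
          if_neg (by omega : ¬(pvCountDiff (pvColf field k) (pvColf field (k + 1)) : Int) ≤ 1)]
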